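-- pv_equiv track=rewrite | github.com/Rahonam/algorithm-syllabus | array/overlapping_sum.py | overlapping_sum
-- ===== SOURCE A (Python) =====
-- def overlapping_sum(arr1: list, arr2: list):
--     """
--     Sum of all the overlapping elements between two arrays
--
--     using: iteration
--
--     Args:
--         arr1: array of integers
--         arr2: array of integers
--
--     Returns:
--         int: sum of overlapping elements of arr1 and arr2
--     """
--     sum = 0
--     arr1_count = {}
--     arr2_count = {}
--
--     for i in arr1:
--         if i in arr1_count:
--             arr1_count[i] += 1
--         else:
--             arr1_count[i] = 1
--
--     for i in arr2:
--         if i in arr2_count: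
--             arr2_count[i] += 1
--         else:
--             arr2_count[i] = 1
--
--     for key, value in arr1_count.items():
--         if key in arr2_count:
--             min_count = min(value, arr2_count[key])
--             sum += key * min_count
--
--     return sum * 2
-- ===== SOURCE B (Python) =====
-- def overlapping_sum(arr1: list, arr2: list):
--     """Sum of overlapping elements (multiset intersection) of arr1 and arr2, times two.
--
--     Sort-then-merge: walk two pointers over sorted copies instead of building
--     frequency dictionaries.
--     """
--     a = sorted(arr1)
--     b = sorted(arr2)
--     i = j = 0
--     s = 0
--     while i < len(a) and j < len(b):
--         if a[i] < b[j]: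
--             i += 1
--         elif b[j] < a[i]:
--             j += 1
--         else:
--             s += a[i]
--             i += 1
--             j += 1
--     return s * 2
-- ===== Notes on version B (the rewrite author's own statement) =====
-- stated objective: alternative
-- what changed: Replaces A's two frequency dictionaries and a scan over the first dict's items with sorted copies of both arrays merged by two pointers, summing each matched element of the multiset intersection directly.
import Mathlib
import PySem

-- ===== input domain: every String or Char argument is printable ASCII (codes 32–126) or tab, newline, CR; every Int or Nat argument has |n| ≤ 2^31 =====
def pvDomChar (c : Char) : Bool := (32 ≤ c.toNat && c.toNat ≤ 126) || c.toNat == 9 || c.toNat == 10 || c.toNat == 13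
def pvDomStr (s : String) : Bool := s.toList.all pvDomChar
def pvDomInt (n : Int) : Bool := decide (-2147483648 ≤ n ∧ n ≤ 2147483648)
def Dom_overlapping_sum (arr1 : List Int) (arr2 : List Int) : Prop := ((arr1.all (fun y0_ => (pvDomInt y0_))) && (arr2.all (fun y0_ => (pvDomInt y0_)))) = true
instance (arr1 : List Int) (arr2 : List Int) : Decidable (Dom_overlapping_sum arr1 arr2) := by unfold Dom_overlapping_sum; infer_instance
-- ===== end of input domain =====

-- B replaces A's two frequency dictionaries (+ a scan over the first dict's items)
-- with a two-pointer merge over sorted copies of both arrays (objective: alternative).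

-- ===== PORT A =====
def overlapping_sum (arr1 : List Int) (arr2 : List Int) : Int :=
  -- sum = 0; build the two count dicts
  let arr1_count : PySem.Dict Int Int :=
    arr1.foldl (fun d i => if d.contains i then d.insert i (d.getD i 0 + 1) else d.insert i 1)
      PySem.Dict.empty
  let arr2_count : PySem.Dict Int Int :=
    arr2.foldl (fun d i => if d.contains i then d.insert i (d.getD i 0 + 1) else d.insert i 1)
      PySem.Dict.empty
  -- for key, value in arr1_count.items(): if key in arr2_count: sum += key * min(value, arr2_count[key])
  let sum :=
    arr1_count.items.foldl
      (fun sum kv =>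
        if arr2_count.contains kv.1 then sum + kv.1 * min kv.2 (arr2_count.getD kv.1 0) else sum)
      0
  sum * 2

-- ===== PORT B =====
-- the while-loop over indices i, j of Source B, transcribed as recursion on the two lists
def mergeSum : List Int → List Int → Int
  | [], _ => 0
  | _ :: _, [] => 0
  | a :: s, b :: t =>
    if a < b then mergeSum s (b :: t)
    else if b < a then mergeSum (a :: s) t
    else a + mergeSum s t
termination_by s t => s.length + t.length

def overlapping_sum_alt (arr1 : List Int) (arr2 : List Int) : Int :=
  let a := PySem.List.sorted arr1 (fun x => x) false
  let b := PySem.List.sorted arr2 (fun x => x) false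
  mergeSum a b * 2

-- ===== PRECONDITION & SPEC =====
def Spec_overlapping_sum (arr1 : List Int) (arr2 : List Int) (out : Int) : Prop := out = overlapping_sum_alt arr1 arr2
instance (arr1 : List Int) (arr2 : List Int) (out : Int) : Decidable (Spec_overlapping_sum arr1 arr2 out) := by unfold Spec_overlapping_sum; infer_instance

-- ===== CLAIM (what is proved, stated in full; the proofs are below) =====
def Claim_equal_overlapping_sum : Prop := ∀ (arr1 : List Int) (arr2 : List Int), Dom_overlapping_sum arr1 arr2 → Spec_overlapping_sum arr1 arr2 (overlapping_sum arr1 arr2)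

-- ===== LEMMAS AND PROOFS =====

-- the common value both programs compute (before the final * 2)
def ovlSum (arr1 arr2 : List Int) : Int :=
  ((PySem.Set.ofList arr1).map
    (fun k => k * min ((arr1.count k : Int)) ((arr2.count k : Int)))).sum

-- A's counting loop is PySem.Dict.counter
lemma count_loop_eq_counter (l : List Int) :
    l.foldl (fun d i => if d.contains i then d.insert i (d.getD i 0 + 1) else d.insert i 1)
      PySem.Dict.empty = PySem.Dict.counter l := by
  rw [← PySem.Dict.foldl_insert_getD_add_one_eq_counter]
  congr 1
  funext d i
  by_cases h : d.contains i
  · simp [h]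
  · simp only [h, Bool.false_eq_true, if_false]
    rw [PySem.Dict.getD_of_not_contains d 0 (by simpa using h)]
    norm_num

lemma overlapping_sum_eq_ovlSum (arr1 arr2 : List Int) :
    overlapping_sum arr1 arr2 = ovlSum arr1 arr2 * 2 := by
  simp only [overlapping_sum, count_loop_eq_counter arr1, count_loop_eq_counter arr2]
  have hstep :
      (fun (sum : Int) (kv : Int × Int) =>
          if (PySem.Dict.counter arr2).contains kv.1 then
            sum + kv.1 * min kv.2 ((PySem.Dict.counter arr2).getD kv.1 0) else sum)
        = fun sum kv =>
          sum + (if (PySem.Dict.counter arr2).contains kv.1 then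
                    kv.1 * min kv.2 ((PySem.Dict.counter arr2).getD kv.1 0) else 0) := by
    funext sum kv
    split <;> simp
  rw [hstep, PySem.List.foldl_add, PySem.Dict.items_counter, List.map_map, zero_add]
  unfold ovlSum
  congr 1
  congr 1
  apply List.map_congr_left
  intro k hk
  simp only [Function.comp_apply, PySem.Dict.contains_counter, PySem.Dict.getD_counter]
  by_cases h2 : k ∈ arr2
  · simp [h2]
  · have hc2 : List.count k arr2 = 0 := List.count_eq_zero_of_not_mem h2
    have hmin : min ((arr1.count k : Int)) ((List.count k arr2 : Int)) = 0 := by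
      rw [hc2]; exact min_eq_right (by positivity)
    simp [h2, hmin]

-- a value smaller than everything in l does not affect bagInter's second argument
lemma bagInter_cons_right_of_not_mem (l : List Int) (b : Int) (t : List Int) (hb : b ∉ l) :
    l.bagInter (b :: t) = l.bagInter t := by
  induction l generalizing t with
  | nil => simp
  | cons c l ih =>
    have hcb : c ≠ b := fun h => hb (h ▸ List.mem_cons_self)
    have hbl : b ∉ l := fun h => hb (List.mem_cons_of_mem _ h)
    by_cases hc : c ∈ t
    · rw [List.cons_bagInter_of_pos _ (List.mem_cons_of_mem _ hc),
          List.cons_bagInter_of_pos _ hc,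
          List.erase_cons_tail (by simpa using hcb.symm), ih _ hbl]
    · rw [List.cons_bagInter_of_neg _ (by simp [hc, hcb]),
          List.cons_bagInter_of_neg _ hc, ih _ hbl]

-- the merge over two sorted lists sums the multiset intersection
lemma mergeSum_eq_bagInter_sum (s t : List Int)
    (hs : s.Pairwise (· ≤ ·)) (ht : t.Pairwise (· ≤ ·)) :
    mergeSum s t = (s.bagInter t).sum := by
  induction s, t using mergeSum.induct with
  | case1 t => simp [mergeSum]
  | case2 a s => simp [mergeSum]
  | case3 a s b t hab ih =>
    have hat : a ∉ b :: t := by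
      intro h
      rcases List.mem_cons.mp h with h | h
      · omega
      · have := (List.pairwise_cons.mp ht).1 _ h; omega
    rw [mergeSum, if_pos hab, List.cons_bagInter_of_neg _ hat,
        ih hs.of_cons ht]
  | case4 a s b t hab hba ih =>
    have hbs : b ∉ a :: s := by
      intro h
      rcases List.mem_cons.mp h with h | h
      · omega
      · have := (List.pairwise_cons.mp hs).1 _ h; omega
    rw [mergeSum, if_neg hab, if_pos hba,
        bagInter_cons_right_of_not_mem _ _ _ hbs, ih hs ht.of_cons]
  | case5 a s b t hab hba ih =>
    have heq : a = b := by omega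
    subst heq
    rw [mergeSum, if_neg hab, if_neg hba,
        List.cons_bagInter_of_pos _ List.mem_cons_self, List.erase_cons_head,
        List.sum_cons, ih hs.of_cons ht.of_cons]

-- the multiset-intersection sum, expressed by counts over the distinct elements of arr1
lemma bagInter_sum_eq_ovlSum (arr1 arr2 : List Int) :
    (arr1.bagInter arr2).sum = ovlSum arr1 arr2 := by
  set l := arr1.bagInter arr2 with hl
  have hsub : l.toFinset ⊆ (PySem.Set.ofList arr1).toFinset := by
    intro a ha
    rw [List.mem_toFinset] at ha
    rw [List.mem_toFinset, PySem.Set.mem_ofList]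
    exact (List.mem_bagInter.mp ha).1
  unfold ovlSum
  rw [← List.sum_toFinset _ (PySem.Set.nodup_ofList arr1)]
  rw [← Finset.sum_subset hsub (by
    intro a _ hal
    rw [List.mem_toFinset] at hal
    have h0 : l.count a = 0 := List.count_eq_zero_of_not_mem hal
    rw [hl, List.count_bagInter] at h0
    have : min ((arr1.count a : Int)) ((arr2.count a : Int)) = 0 := by
      rw [← Nat.cast_min, h0]; rfl
    simp [this])]
  rw [Finset.sum_list_count l]
  apply Finset.sum_congr rfl
  intro a ha
  rw [List.mem_toFinset] at ha
  rw [hl, List.count_bagInter, nsmul_eq_mul, Nat.cast_min]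
  ring

lemma overlapping_sum_alt_eq_ovlSum (arr1 arr2 : List Int) :
    overlapping_sum_alt arr1 arr2 = ovlSum arr1 arr2 * 2 := by
  simp only [overlapping_sum_alt]
  rw [mergeSum_eq_bagInter_sum _ _
        (by simpa using PySem.List.sorted_pairwise arr1 (fun x => x))
        (by simpa using PySem.List.sorted_pairwise arr2 (fun x => x))]
  rw [List.Perm.bagInter_left _ (PySem.List.sorted_perm arr2 (fun x => x) false)]
  rw [((PySem.List.sorted_perm arr1 (fun x => x) false).bagInter_right arr2).sum_eq]
  rw [bagInter_sum_eq_ovlSum]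

-- ===== VERDICT (by name: the statement is the Claim_ definition above) =====
theorem overlapping_sum_spec : Claim_equal_overlapping_sum := by
  intro arr1 arr2 _
  unfold Spec_overlapping_sum
  rw [overlapping_sum_eq_ovlSum, overlapping_sum_alt_eq_ovlSum]
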